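-- pv_equiv track=rewrite | github.com/orwithout/noj.nwpu | 37.Power/37.solution.py | sameBitsIs
-- ===== SOURCE A (Python) =====
-- def sameBitsIs(bits):    # 0,1,5,6的任意次方，个位数仍然是 0,1,5,6
--     sum = 1
--     t = bits
--     while True:
--         t = t*bits %10
--         sum += 1
--         if t in (0,1,5,6):
--             return sum,t
-- ===== SOURCE B (Python) =====
-- # Closed-form table: the answer depends only on bits % 10, so look it up directly.
-- _TABLE = {0: (2, 0), 1: (2, 1), 2: (4, 6), 3: (4, 1), 4: (2, 6),
--           5: (2, 5), 6: (2, 6), 7: (4, 1), 8: (4, 6), 9: (2, 1)}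
--
-- def sameBitsIs(bits):
--     return _TABLE[bits % 10]
-- ===== Notes on version B (the rewrite author's own statement) =====
-- stated objective: simpler
-- what changed: Replaced the repeated-multiplication loop by a precomputed dict keyed on the last decimal digit of bits that gives the (exponent, last digit) answer directly with no loop.
import Mathlib
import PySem

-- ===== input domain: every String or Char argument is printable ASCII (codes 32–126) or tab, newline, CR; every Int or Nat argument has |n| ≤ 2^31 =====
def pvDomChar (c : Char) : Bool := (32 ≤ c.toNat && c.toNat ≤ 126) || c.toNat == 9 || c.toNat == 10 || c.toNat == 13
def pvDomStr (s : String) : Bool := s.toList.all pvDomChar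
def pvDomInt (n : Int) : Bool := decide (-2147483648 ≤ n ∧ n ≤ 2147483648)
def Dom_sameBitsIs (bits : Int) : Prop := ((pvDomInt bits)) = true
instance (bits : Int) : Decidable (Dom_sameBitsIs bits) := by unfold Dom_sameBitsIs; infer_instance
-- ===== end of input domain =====

-- ===== PORT A =====
-- B replaces A's multiply-until-0/1/5/6 loop by a precomputed table keyed on bits % 10 (simpler, no loop).
-- A's while-True loop always returns within 3 iterations; fuel 4 makes the recursion total (the fuel-0
-- fallback is unreachable).
def pvLoopA (bits : Int) : Int → Int → Nat → Int × Int
  | t, sum, 0 => (sum, t)      -- unreachable fuel guard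
  | t, sum, Nat.succ n =>
    let t' := PySem.Int.mod (t * bits) 10
    let sum' := sum + 1
    if t' = 0 ∨ t' = 1 ∨ t' = 5 ∨ t' = 6 then (sum', t')
    else pvLoopA bits t' sum' n

def sameBitsIs (bits : Int) : Int × Int := pvLoopA bits bits 1 4

-- ===== PORT B =====
def pvTable : PySem.Dict Int (Int × Int) :=
  PySem.Dict.ofList [(0, (2, 0)), (1, (2, 1)), (2, (4, 6)), (3, (4, 1)), (4, (2, 6)),
                     (5, (2, 5)), (6, (2, 6)), (7, (4, 1)), (8, (4, 6)), (9, (2, 1))]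

-- _TABLE[bits % 10]; the KeyError branch (.getD fallback) is unreachable: bits % 10 ∈ [0,10).
def sameBitsIs_alt (bits : Int) : Int × Int :=
  (PySem.Dict.get? pvTable (PySem.Int.mod bits 10)).getD (0, 0)

-- ===== PRECONDITION & SPEC =====
def Spec_sameBitsIs (bits : Int) (out : Int × Int) : Prop := out = sameBitsIs_alt bits
instance (bits : Int) (out : Int × Int) : Decidable (Spec_sameBitsIs bits out) := by unfold Spec_sameBitsIs; infer_instance

-- ===== CLAIM (what is proved, stated in full; the proofs are below) =====
def Claim_equal_sameBitsIs : Prop := ∀ (bits : Int), Dom_sameBitsIs bits → Spec_sameBitsIs bits (sameBitsIs bits)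

-- ===== LEMMAS AND PROOFS =====
theorem pvMod10 (a : Int) : PySem.Int.mod a 10 = a % 10 :=
  PySem.Int.mod_eq_emod_of_pos (by norm_num)

theorem pvMulMod (t b : Int) : (t * b) % 10 = (t * (b % 10)) % 10 := by
  conv_lhs => rw [Int.mul_emod]
  conv_rhs => rw [Int.mul_emod, Int.emod_emod_of_dvd _ (dvd_refl 10)]

-- the loop only uses bits through t*bits % 10, so bits may be reduced mod 10
theorem pvLoop_bits_mod (bits : Int) : ∀ (n : Nat) (t s : Int),
    pvLoopA bits t s n = pvLoopA (bits % 10) t s n := by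
  intro n
  induction n with
  | zero => intro t s; rfl
  | succ n ih =>
    intro t s
    simp only [pvLoopA, pvMod10, pvMulMod t bits]
    split <;> [rfl; exact ih _ _]

-- the first iteration only uses t through t*bits % 10, so t may be reduced mod 10
theorem pvLoop_t_mod (b t s : Int) (n : Nat) :
    pvLoopA b t s (n + 1) = pvLoopA b (t % 10) s (n + 1) := by
  simp only [pvLoopA, pvMod10]
  rw [mul_comm t b, pvMulMod b t, mul_comm b (t % 10)]

-- ===== VERDICT (by name: the statement is the Claim_ definition above) =====
theorem sameBitsIs_spec : Claim_equal_sameBitsIs := by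
  intro bits _
  unfold Spec_sameBitsIs sameBitsIs sameBitsIs_alt
  rw [pvLoop_bits_mod bits 4 bits 1, pvLoop_t_mod, pvMod10]
  have h0 : 0 ≤ bits % 10 := Int.emod_nonneg bits (by norm_num)
  have h1 : bits % 10 < 10 := Int.emod_lt_of_pos bits (by norm_num)
  interval_cases h : (bits % 10) <;> decide
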